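-- pv_equiv track=rewrite | github.com/dsfbumacod06/ds_capbuild_python | CodeWars - Walkthrough/Coding Challenges 6/challenge1.py | expanded_form2
-- ===== SOURCE A (Python) =====
-- def expanded_form2(num):
--     num_len = len(str(num)) - 1
--     addends = []
--     while num_len > 0:
--         if num % (factor := 10 ** num_len) != 0:
--             addends.append(addend := (num // factor) * factor)
--             num -= addend
--             num_len -= 1
--         else:
--             num_len -= 1
--     addends.append(num)
--     return ' + '.join([str(x) for x in addends if x != 0])
-- ===== SOURCE B (Python) =====
-- def expanded_form2(num):
--     s = str(num)
--     return ' + '.join(str(int(d) * 10 ** (len(s) - 1 - i))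
--                       for i, d in enumerate(s) if d != '0')
-- ===== Notes on version B (the rewrite author's own statement) =====
-- stated objective: simpler
-- what changed: Replaces A's while-loop of repeated highest-place extraction (modulo test, floor-division, subtraction, remainder update) by a single pass over the decimal string that maps each nonzero digit directly to its place value.
-- outside the precondition, e.g. on expanded_form2(-304): A returns '-1000 + 600 + 90 + 6', B raises ValueError; on expanded_form2(-1): A returns '-10 + 9', B raises ValueError
import Mathlib
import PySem

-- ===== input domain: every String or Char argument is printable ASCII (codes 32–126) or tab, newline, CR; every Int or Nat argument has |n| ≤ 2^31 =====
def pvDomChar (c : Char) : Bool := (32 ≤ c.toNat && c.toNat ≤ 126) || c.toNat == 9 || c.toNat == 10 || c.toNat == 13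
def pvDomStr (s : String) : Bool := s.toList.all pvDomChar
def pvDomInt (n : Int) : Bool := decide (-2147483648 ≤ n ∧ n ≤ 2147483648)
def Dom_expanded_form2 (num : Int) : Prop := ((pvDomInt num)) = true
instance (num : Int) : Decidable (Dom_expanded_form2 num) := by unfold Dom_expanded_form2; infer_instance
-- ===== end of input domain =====

-- B replaces A's while-loop of highest-place subtraction by a single pass over the decimal
-- string, mapping each nonzero digit directly to its place value (objective: simpler).

-- ===== PORT A =====
-- while num_len > 0: … — fuel = num_len, which Python decrements by exactly 1 each iteration.
def expanded_form2_loop : Nat → Int → List Int → List Int × Int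
  | 0, num, addends => (addends, num)
  | Nat.succ k, num, addends =>
    let factor : Int := 10 ^ (k + 1)
    if PySem.Int.mod num factor ≠ 0 then
      let addend := PySem.Int.floordiv num factor * factor
      expanded_form2_loop k (num - addend) (addends ++ [addend])
    else
      expanded_form2_loop k num addends

def expanded_form2 (num : Int) : String :=
  -- num_len = len(str(num)) - 1 : always ≥ 0, so Nat subtraction after toNat is exact
  let numLen : Nat := ((PySem.Int.toStr num).toList.length - 1)
  let r := expanded_form2_loop numLen num []
  let addends := r.1 ++ [r.2]
  PySem.Str.join " + " ((addends.filter (fun x => x ≠ 0)).map PySem.Int.toStr)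

-- ===== PORT B =====
def expanded_form2_alt (num : Int) : String :=
  let s := (PySem.Int.toStr num).toList
  let n : Int := PySem.List.len s
  PySem.Str.join " + " ((PySem.List.enumerate s).filterMap (fun p =>
    if p.2 ≠ '0' then
      some (PySem.Int.toStr ((PySem.Int.ofChars? [p.2]).getD 0 * 10 ^ (n - 1 - p.1).toNat))
    else none))

-- ===== PRECONDITION & SPEC =====
-- Pre_ excludes negative numbers: there A's '-'-inclusive string length and floor division
-- produce an accidental decomposition (e.g. -1 → '-10 + 9') while B's per-digit int() raises
-- ValueError, so on negatives B has no return value to match.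
def Pre_expanded_form2 (num : Int) : Prop := 0 ≤ num
instance (num : Int) : Decidable (Pre_expanded_form2 num) := by unfold Pre_expanded_form2; infer_instance

def pvWitness_expanded_form2 : Int := (1204)

def Spec_expanded_form2 (num : Int) (out : String) : Prop := out = expanded_form2_alt num
instance (num : Int) (out : String) : Decidable (Spec_expanded_form2 num out) := by unfold Spec_expanded_form2; infer_instance

-- ===== CLAIM (what is proved, stated in full; the proofs are below) =====
def Claim_equal_expanded_form2 : Prop := ∀ (num : Int), Dom_expanded_form2 num → Pre_expanded_form2 num → Spec_expanded_form2 num (expanded_form2 num)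

-- ===== LEMMAS AND PROOFS =====

lemma range_reverse_eq (n : Nat) : (List.range n).reverse = (List.range n).map (fun i => n - 1 - i) := by
  apply List.ext_getElem <;> simp [List.getElem_reverse]

lemma toDigitsCore_eq (f : Nat) : ∀ (m : Nat) (acc : List Char), 0 < m → m < 10 ^ f →
    Nat.toDigitsCore 10 f m acc = ((Nat.digits 10 m).map Nat.digitChar).reverse ++ acc := by
  induction f with
  | zero => intro m acc hm hf; omega
  | succ f ih =>
    intro m acc hm hf
    rw [Nat.digits_def' (by norm_num) hm]
    by_cases h : m / 10 = 0
    · simp only [Nat.toDigitsCore, h, if_true]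
      simp
    · simp only [Nat.toDigitsCore, h, if_false]
      rw [ih (m / 10) _ (Nat.pos_of_ne_zero h) (by
        rw [Nat.div_lt_iff_lt_mul (by norm_num)]
        calc m < 10 ^ (f+1) := hf
        _ = 10 ^ f * 10 := by ring)]
      simp

lemma toChars_pos (m : Nat) (hm : 0 < m) :
    PySem.Int.toChars (m : Int) = ((Nat.digits 10 m).map Nat.digitChar).reverse := by
  have : ¬ ((m : Int) < 0) := by omega
  simp only [PySem.Int.toChars, this, if_false, Int.toNat_natCast]
  show Nat.toDigitsCore 10 (m+1) m [] = _
  rw [toDigitsCore_eq (m+1) m [] hm (lt_trans (Nat.lt_pow_self (a := 10) (by norm_num)) (Nat.pow_lt_pow_succ (by norm_num)))]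
  simp

lemma digits_getElem : ∀ (j m : Nat), ∀ (hj : j < (Nat.digits 10 m).length),
    (Nat.digits 10 m)[j] = m / 10 ^ j % 10 := by
  intro j
  induction j with
  | zero =>
    intro m hj
    have hm : 0 < m := by
      by_contra h
      simp [show m = 0 by omega] at hj
    rw [List.getElem_of_eq (Nat.digits_def' (by norm_num) hm)]
    simp
  | succ j ih =>
    intro m hj
    have hm : 0 < m := by
      by_contra h
      simp [show m = 0 by omega] at hj
    rw [Nat.digits_def' (by norm_num : (1:ℕ) < 10) hm] at hj
    rw [List.getElem_of_eq (Nat.digits_def' (by norm_num) hm)]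
    simp only [List.getElem_cons_succ]
    rw [ih (m / 10) (by simpa using hj)]
    rw [Nat.div_div_eq_div_mul]
    congr 1
    ring_nf

lemma loop_skip : ∀ (k : Nat) (num : Int) (acc : List Int), (10 : Int) ^ k ∣ num →
    expanded_form2_loop k num acc = (acc, num) := by
  intro k
  induction k with
  | zero => intro num acc _; rfl
  | succ k ih =>
    intro num acc h
    have hz : PySem.Int.mod num (10 ^ (k+1)) = 0 := (PySem.Int.mod_eq_zero_iff_dvd _ _).mpr h
    simp only [expanded_form2_loop, hz, ne_eq, not_true_eq_false, if_false]
    exact ih num acc (dvd_trans (pow_dvd_pow 10 (Nat.le_succ k)) h)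

def placeTerms (num : Int) (k : Nat) : List Int :=
  (List.range (k + 1)).reverse.filterMap (fun j =>
    if num / 10 ^ j % 10 ≠ 0 then some (num / 10 ^ j % 10 * 10 ^ j) else none)

lemma emod_pow_div_digit (num : Int) (j k : Nat) (hj : j ≤ k) :
    (num % 10 ^ (k+1)) / 10 ^ j % 10 = num / 10 ^ j % 10 := by
  have hF : (10:Int) ^ (k+1) = 10 ^ (k+1-j) * 10 ^ j := by
    rw [← pow_add]; congr 1; omega
  have hq : num = num % 10 ^ (k+1) + (num / 10 ^ (k+1) * 10 ^ (k+1-j)) * 10 ^ j := by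
    rw [mul_assoc, ← hF]; exact (Int.emod_add_ediv_mul num _).symm
  conv_rhs => rw [hq]
  rw [Int.add_mul_ediv_right _ _ (by positivity)]
  have : num / 10 ^ (k+1) * 10 ^ (k+1-j) = num / 10 ^ (k+1) * 10 ^ (k-j) * 10 := by
    rw [mul_assoc]; congr 1; rw [← pow_succ]; congr 1; omega
  rw [this, Int.add_mul_emod_self_right]

lemma placeTerms_succ (num : Int) (k : Nat) :
    placeTerms num (k+1) = (if num / 10 ^ (k+1) % 10 ≠ 0 then [num / 10 ^ (k+1) % 10 * 10 ^ (k+1)] else []) ++ placeTerms num k := by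
  unfold placeTerms
  rw [List.range_succ, List.reverse_append]
  simp only [List.reverse_singleton, List.singleton_append, List.filterMap_cons]
  split_ifs <;> simp

lemma placeTerms_emod (num : Int) (k : Nat) :
    placeTerms (num % 10 ^ (k+1)) k = placeTerms num k := by
  unfold placeTerms
  apply List.filterMap_congr
  intro j hj
  have hjk : j ≤ k := by
    have := List.mem_range.mp (List.mem_reverse.mp hj); omega
  rw [emod_pow_div_digit num j k hjk]

lemma placeTerms_zero_of_dvd (num : Int) (k : Nat) (h : (10:Int) ^ (k+1) ∣ num) :
    placeTerms num k = [] := by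
  unfold placeTerms
  rw [List.filterMap_eq_nil_iff]
  intro j hj
  have hjk : j + 1 ≤ k + 1 := by
    have := List.mem_range.mp (List.mem_reverse.mp hj); omega
  obtain ⟨c, hc⟩ := dvd_trans (pow_dvd_pow (10:Int) hjk) h
  have : num / 10 ^ j = 10 * c := by
    rw [hc, show (10:Int) ^ (j+1) * c = 10 ^ j * (10 * c) by ring,
      Int.mul_ediv_cancel_left _ (by positivity)]
  simp [this, Int.mul_emod_right]

lemma loop_spec (k : Nat) : ∀ (num : Int) (acc : List Int), 0 ≤ num → num < 10 ^ (k + 1) →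
    ((expanded_form2_loop k num acc).1 ++ [(expanded_form2_loop k num acc).2]).filter (fun x => x ≠ 0)
      = acc.filter (fun x => x ≠ 0) ++ placeTerms num k := by
  induction k with
  | zero =>
    intro num acc h0 h1
    show ((acc ++ [num]).filter _) = _
    rw [List.filter_append]
    have hnum : num % 10 = num := Int.emod_eq_of_lt h0 (by simpa using h1)
    congr 1
    unfold placeTerms
    rw [List.range_one, List.reverse_singleton]
    rw [show List.filterMap (fun j => if num / 10 ^ j % 10 ≠ 0 then some (num / 10 ^ j % 10 * 10 ^ j) else none) [0]
        = ((if num / 10 ^ 0 % 10 ≠ 0 then some (num / 10 ^ 0 % 10 * 10 ^ 0) else none) : Option Int).toList from by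
      by_cases hd : (10:Int) ∣ num <;> simp [List.filterMap_cons, hd, Option.toList]]
    simp only [pow_zero, Int.ediv_one, hnum, mul_one]
    by_cases h : num = 0
    · simp [h, List.filter]
    · rw [if_pos h]
      simp [List.filter, h]
  | succ k ih =>
    intro num acc h0 h1
    have hFpos : (0:Int) < 10 ^ (k+1) := by positivity
    have hdF : num / 10 ^ (k+1) % 10 = num / 10 ^ (k+1) := by
      apply Int.emod_eq_of_lt (Int.ediv_nonneg h0 (le_of_lt hFpos))
      apply Int.ediv_lt_of_lt_mul hFpos
      calc num < 10 ^ (k+1+1) := h1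
      _ = 10 * 10 ^ (k+1) := by ring
    by_cases hm : PySem.Int.mod num (10 ^ (k+1)) = 0
    · have hdvd : (10:Int) ^ (k+1) ∣ num := (PySem.Int.mod_eq_zero_iff_dvd _ _).mp hm
      have hloop : expanded_form2_loop (k+1) num acc = (acc, num) := by
        show (if PySem.Int.mod num (10 ^ (k+1)) ≠ 0 then _ else _) = _
        rw [if_neg (by simpa using hm)]
        exact loop_skip k num acc (dvd_trans (pow_dvd_pow 10 (Nat.le_succ k)) hdvd)
      rw [hloop, placeTerms_succ, placeTerms_zero_of_dvd num k hdvd, List.filter_append]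
      have hcan : num / 10 ^ (k+1) * 10 ^ (k+1) = num := Int.ediv_mul_cancel hdvd
      by_cases hz : num = 0
      · simp [hz]
      · have : num / 10 ^ (k+1) ≠ 0 := fun h => hz (by rw [← hcan, h, zero_mul])
        simp [hdF, hcan, this, List.filter, hz]
    · have hmod : PySem.Int.mod num (10 ^ (k+1)) = num % 10 ^ (k+1) :=
        PySem.Int.mod_eq_emod_of_pos hFpos
      have hdiv : PySem.Int.floordiv num (10 ^ (k+1)) = num / 10 ^ (k+1) :=
        PySem.Int.floordiv_eq_ediv_of_pos hFpos
      have hloop : expanded_form2_loop (k+1) num acc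
          = expanded_form2_loop k (num - num / 10 ^ (k+1) * 10 ^ (k+1))
              (acc ++ [num / 10 ^ (k+1) * 10 ^ (k+1)]) := by
        show (if PySem.Int.mod num (10 ^ (k+1)) ≠ 0 then _ else _) = _
        rw [if_pos (by simpa using hm), hdiv]
      have hsub : num - num / 10 ^ (k+1) * 10 ^ (k+1) = num % 10 ^ (k+1) := by
        rw [Int.emod_def]; ring
      rw [hloop, hsub, ih (num % 10 ^ (k+1)) _ (Int.emod_nonneg num (ne_of_gt hFpos))
        (Int.emod_lt_of_pos num hFpos)]
      rw [placeTerms_emod, placeTerms_succ, List.filter_append, List.append_assoc]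
      congr 1
      by_cases hz : num / 10 ^ (k+1) = 0
      · simp [hz, hdF, List.filter]
      · have hprod : num / 10 ^ (k+1) * 10 ^ (k+1) ≠ 0 := by
          intro h
          rcases mul_eq_zero.mp h with h' | h'
          · exact hz h'
          · exact absurd h' (by positivity)
        have hne : num / 10 ^ (k+1) % 10 ≠ 0 := by rw [hdF]; exact hz
        rw [if_pos hne, hdF]
        simp [hprod, List.filter]

lemma digitChar_ne_zero (a : Nat) (ha : a < 10) : (Nat.digitChar a ≠ '0') ↔ a ≠ 0 := by
  interval_cases a <;> decide

lemma ofChars_digitChar (a : Nat) (ha : a < 10) :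
    (PySem.Int.ofChars? [Nat.digitChar a]).getD 0 = (a : Int) := by
  interval_cases a <;> decide

lemma main_eq (num : Int) (h0 : 0 ≤ num) : expanded_form2 num = expanded_form2_alt num := by
  by_cases hz : num = 0
  · subst hz; decide
  · obtain ⟨m, rfl⟩ := Int.eq_ofNat_of_zero_le h0
    have hm : 0 < m := by omega
    set L := (Nat.digits 10 m).length with hLdef
    have hL : 0 < L := List.length_pos_iff.mpr
      ((Nat.digits_ne_nil_iff_ne_zero).mpr (by omega))
    have hds : (PySem.Int.toStr (m : Int)).toList = ((Nat.digits 10 m).map Nat.digitChar).reverse := by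
      rw [PySem.Int.toList_toStr]; exact toChars_pos m hm
    have hlen : (PySem.Int.toStr (m : Int)).toList.length = L := by
      rw [hds]; simpa using hLdef.symm
    have hmlt : (m : Int) < 10 ^ L := by
      have := Nat.lt_base_pow_length_digits (b := 10) (m := m) (by norm_num)
      exact_mod_cast this
    -- A side
    have hA : expanded_form2 (m : Int)
        = PySem.Str.join " + " ((placeTerms (m : Int) (L - 1)).map PySem.Int.toStr) := by
      show PySem.Str.join " + " _ = _
      rw [hlen]
      rw [loop_spec (L - 1) (m : Int) [] h0 (by rw [Nat.sub_add_cancel hL]; exact hmlt)]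
      simp
    rw [hA]
    -- B side
    show _ = PySem.Str.join " + " _
    congr 1
    unfold placeTerms
    rw [List.map_filterMap, Nat.sub_add_cancel hL, range_reverse_eq, List.filterMap_map]
    rw [PySem.List.enumerate_eq_map_pyRange _ '0', PySem.List.len_eq, hlen,
      PySem.List.pyRange_zero_natCast, List.filterMap_map, List.filterMap_map]
    apply List.filterMap_congr
    intro i hi
    have hiL : i < L := List.mem_range.mp hi
    have hidx : L - 1 - i < L := by omega
    have hget : (PySem.Int.toStr (m : Int)).toList[i]'(by omega) = Nat.digitChar ((Nat.digits 10 m)[L-1-i]'(by omega)) := by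
      rw [List.getElem_of_eq hds, List.getElem_reverse, List.getElem_map]
      congr 2
      simp [hLdef]
    have ha : (Nat.digits 10 m)[L-1-i]'(by omega) = m / 10 ^ (L-1-i) % 10 :=
      digits_getElem (L-1-i) m (by omega)
    have halt : m / 10 ^ (L-1-i) % 10 < 10 := Nat.mod_lt _ (by norm_num)
    simp only [Function.comp]
    rw [PySem.List.pyGetD_natCast, List.getD_eq_getElem _ _ (by rw [hlen]; exact hiL), hget, ha]
    have hexp : (((L : Int)) - 1 - (i : Int)).toNat = L - 1 - i := by omega
    rw [hexp, ofChars_digitChar _ halt]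
    have hcast : ((m : Int)) / 10 ^ (L-1-i) % 10 = ((m / 10 ^ (L-1-i) % 10 : Nat) : Int) := by
      push_cast
      rfl
    rw [hcast]
    by_cases hz2 : m / 10 ^ (L-1-i) % 10 = 0
    · rw [if_neg (by simp [hz2, Nat.digitChar]), if_neg (by simp [hz2, Nat.digitChar])]
      rfl
    · rw [if_pos ((digitChar_ne_zero _ halt).mpr hz2), if_pos (by exact_mod_cast hz2)]
      simp

-- ===== VERDICT (by name: the statement is the Claim_ definition above) =====
theorem expanded_form2_spec : Claim_equal_expanded_form2 := by
  intro num _ hpre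
  unfold Spec_expanded_form2
  exact main_eq num hpre
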